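-- pv_equiv track=rewrite | github.com/jyb2605/jackkong_algo | week 11~20/week16_20200704/jaeyeonlee0621_programmers_1.py | solution
-- ===== SOURCE A (Python) =====
-- def solution(name_list):
--     for i in range(len(name_list)):
--         compare = name_list[i]
--         for j in range(len(name_list)):
--             if i == j: continue
--             if compare in name_list[j]:
--                 return True
--     return False
-- ===== SOURCE B (Python) =====
-- def solution(name_list):
--     # sort by length (stable), then only test each name against the later
--     # (no-shorter) names: a substring can only occur in a name of >= length,
--     # and an equal-length hit is an exact duplicate, which sorting keeps adjacent-or-later.
--     by_len = sorted(name_list, key=len)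
--     for k in range(len(by_len)):
--         s = by_len[k]
--         for t in by_len[k + 1:]:
--             if s in t:
--                 return True
--     return False
-- ===== Notes on version B (the rewrite author's own statement) =====
-- stated objective: alternative
-- what changed: B sorts the names by length once and then tests each name for occurrence only in the names after it in the sorted list (half the ordered pairs, one direction), instead of A's full double loop over all ordered index pairs i != j.
import Mathlib
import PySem

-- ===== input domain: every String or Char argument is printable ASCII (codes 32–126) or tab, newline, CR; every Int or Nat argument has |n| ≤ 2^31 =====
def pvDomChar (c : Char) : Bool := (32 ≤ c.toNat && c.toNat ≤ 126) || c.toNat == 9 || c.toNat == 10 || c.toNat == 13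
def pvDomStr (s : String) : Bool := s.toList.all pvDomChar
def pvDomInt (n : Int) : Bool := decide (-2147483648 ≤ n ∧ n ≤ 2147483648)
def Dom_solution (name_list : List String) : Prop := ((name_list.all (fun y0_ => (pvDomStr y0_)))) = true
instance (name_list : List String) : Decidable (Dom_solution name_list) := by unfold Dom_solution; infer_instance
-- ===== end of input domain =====

-- B replaces A's full double loop over ordered index pairs by one length-sort followed by
-- substring tests of each name only against the names after it in the sorted list (objective: alternative).

-- ===== PORT A =====
def solution (name_list : List String) : Bool :=
  (PySem.List.pyRange 0 (PySem.List.len name_list) 1).any (fun i =>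
    let compare := PySem.List.pyGetD name_list i ""
    (PySem.List.pyRange 0 (PySem.List.len name_list) 1).any (fun j =>
      if i = j then false    -- 'if i == j: continue'
      else PySem.Str.isIn compare (PySem.List.pyGetD name_list j "")))

-- ===== PORT B =====
def solution_alt (name_list : List String) : Bool :=
  let by_len := PySem.List.sorted name_list (fun s => PySem.Str.len s) false
  (PySem.List.pyRange 0 (PySem.List.len by_len) 1).any (fun k =>
    let s := PySem.List.pyGetD by_len k ""
    (PySem.List.slice by_len (some (k + 1)) none).any (fun t => PySem.Str.isIn s t))

-- ===== PRECONDITION & SPEC =====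
def Spec_solution (name_list : List String) (out : Bool) : Prop := out = solution_alt name_list
instance (name_list : List String) (out : Bool) : Decidable (Spec_solution name_list out) := by unfold Spec_solution; infer_instance

-- ===== CLAIM (what is proved, stated in full; the proofs are below) =====
def Claim_equal_solution : Prop := ∀ (name_list : List String), Dom_solution name_list → Spec_solution name_list (solution name_list)

-- ===== LEMMAS AND PROOFS =====

-- The common characterisation: some name occurs (as a substring) in a name at a different index.
def HasPair (xs : List String) : Prop :=
  ∃ (i j : Nat) (_ : i < xs.length) (_ : j < xs.length),
    i ≠ j ∧ PySem.Str.isIn xs[i] xs[j] = true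

theorem isIn_len_le {a b : String} (h : PySem.Str.isIn a b = true) :
    a.toList.length ≤ b.toList.length :=
  ((PySem.Str.isIn_iff_infix a b).mp h).length_le

theorem isIn_eq_of_len {a b : String} (h : PySem.Str.isIn a b = true)
    (hl : a.toList.length = b.toList.length) : a = b :=
  String.toList_inj.mp (((PySem.Str.isIn_iff_infix a b).mp h).eq_of_length hl)

theorem isIn_self (a : String) : PySem.Str.isIn a a = true :=
  (PySem.Str.isIn_iff_infix a a).mpr (List.infix_refl _)

-- membership in a drop, with its position in the original list
theorem mem_drop_iff {α : Type} {l : List α} {n : Nat} {x : α} :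
    x ∈ l.drop n ↔ ∃ (m : Nat) (_ : m < l.length), n ≤ m ∧ l[m] = x := by
  constructor
  · intro hx
    obtain ⟨k, hk, hkx⟩ := List.mem_iff_getElem.mp hx
    have hlen : k < l.length - n := by simpa using hk
    refine ⟨n + k, by omega, by omega, ?_⟩
    rw [← List.getElem_drop (h := hk)]; exact hkx
  · rintro ⟨m, hm, hnm, hmx⟩
    have hk : m - n < (l.drop n).length := by simp; omega
    have e : (l.drop n)[m - n] = l[n + (m - n)] := List.getElem_drop
    have h2 : (l.drop n)[m - n] = x := by
      rw [e]; have e2 : n + (m - n) = m := by omega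
      simp only [e2]; exact hmx
    exact h2 ▸ List.getElem_mem hk

-- two distinct positions holding the same value give count ≥ 2 …
theorem count_two_of_lt {α : Type} [DecidableEq α] {l : List α} {i j : Nat}
    (hi : i < l.length) (hj : j < l.length) (hij : i < j) (h : l[i] = l[j]) :
    2 ≤ l.count l[i] := by
  have h1 : l[i] ∈ l.take j := by
    have e : (l.take j)[i]'(by simp; omega) = l[i] := List.getElem_take
    exact e ▸ List.getElem_mem _
  have h2 : l[i] ∈ l.drop j := mem_drop_iff.mpr ⟨j, hj, Nat.le_refl j, h.symm⟩
  have c1 := List.count_pos_iff.mpr h1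
  have c2 := List.count_pos_iff.mpr h2
  have hsplit : l.count l[i] = (l.take j).count l[i] + (l.drop j).count l[i] := by
    rw [← List.count_append, List.take_append_drop]
  omega

theorem count_two_of_pair {α : Type} [DecidableEq α] {l : List α} {i j : Nat}
    (hi : i < l.length) (hj : j < l.length) (hij : i ≠ j) (h : l[i] = l[j]) :
    2 ≤ l.count l[i] := by
  rcases Nat.lt_or_ge i j with hlt | hge
  · exact count_two_of_lt hi hj hlt h
  · have := count_two_of_lt hj hi (by omega) h.symm
    rwa [← h] at this

-- … and conversely
theorem pair_of_count_two {α : Type} [DecidableEq α] {l : List α} {a : α}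
    (h : 2 ≤ l.count a) :
    ∃ (i j : Nat) (_ : i < l.length) (_ : j < l.length),
      i < j ∧ l[i] = a ∧ l[j] = a := by
  induction l with
  | nil => simp at h
  | cons x t ih =>
    rw [List.count_cons] at h
    by_cases hx : x = a
    · subst hx
      rw [if_pos (by simp)] at h
      have hmem : x ∈ t := List.count_pos_iff.mp (by omega)
      obtain ⟨k, hk, hkx⟩ := List.mem_iff_getElem.mp hmem
      exact ⟨0, k + 1, by simp, by simp; omega, by omega, rfl, by simpa using hkx⟩
    · rw [if_neg (by simp [hx])] at h
      obtain ⟨i, j, hi, hj, hij, hia, hja⟩ := ih (by omega)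
      exact ⟨i + 1, j + 1, by simp; omega, by simp; omega, by omega,
        by simpa using hia, by simpa using hja⟩

-- A returns true exactly on HasPair
theorem A_iff (xs : List String) : solution xs = true ↔ HasPair xs := by
  unfold solution HasPair
  simp only [List.any_eq_true, PySem.List.mem_pyRange_one, PySem.List.len_eq]
  constructor
  · rintro ⟨i, ⟨hi0, hin⟩, j, ⟨hj0, hjn⟩, hcond⟩
    by_cases hij : i = j
    · rw [if_pos hij] at hcond; exact absurd hcond (by simp)
    · rw [if_neg hij] at hcond
      lift i to Nat using hi0 with ni
      lift j to Nat using hj0 with nj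
      have hni : ni < xs.length := by exact_mod_cast hin
      have hnj : nj < xs.length := by exact_mod_cast hjn
      refine ⟨ni, nj, hni, hnj, by exact_mod_cast hij, ?_⟩
      rwa [PySem.List.pyGetD_natCast, PySem.List.pyGetD_natCast,
        List.getD_eq_getElem _ _ hni, List.getD_eq_getElem _ _ hnj] at hcond
  · rintro ⟨i, j, hi, hj, hij, hsub⟩
    refine ⟨(i : Int), ⟨by positivity, by exact_mod_cast hi⟩,
            (j : Int), ⟨by positivity, by exact_mod_cast hj⟩, ?_⟩
    have hne : (i : Int) ≠ (j : Int) := by exact_mod_cast hij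
    rw [if_neg hne, PySem.List.pyGetD_natCast, PySem.List.pyGetD_natCast,
      List.getD_eq_getElem _ _ hi, List.getD_eq_getElem _ _ hj]
    exact hsub

-- B returns true exactly on a sorted pair k < m
theorem B_iff (xs : List String) :
    solution_alt xs = true ↔
      ∃ (k m : Nat) (_ : k < (PySem.List.sorted xs (fun s => PySem.Str.len s)).length)
        (_ : m < (PySem.List.sorted xs (fun s => PySem.Str.len s)).length),
        k < m ∧ PySem.Str.isIn (PySem.List.sorted xs (fun s => PySem.Str.len s))[k]
                  (PySem.List.sorted xs (fun s => PySem.Str.len s))[m] = true := by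
  unfold solution_alt
  set ys := PySem.List.sorted xs (fun s => PySem.Str.len s) with hys
  simp only [List.any_eq_true, PySem.List.mem_pyRange_one, PySem.List.len_eq]
  constructor
  · rintro ⟨k, ⟨hk0, hkn⟩, t, ht, hsub⟩
    lift k to Nat using hk0 with nk
    have hnk : nk < ys.length := by exact_mod_cast hkn
    have hcast : ((nk : Int) + 1) = (((nk + 1 : Nat)) : Int) := by push_cast; ring
    rw [hcast, PySem.List.slice_from_natCast] at ht
    obtain ⟨m, hm, hnm, hmt⟩ := mem_drop_iff.mp ht
    refine ⟨nk, m, hnk, hm, by omega, ?_⟩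
    rw [← hmt, PySem.List.pyGetD_natCast, List.getD_eq_getElem _ _ hnk] at hsub
    exact hsub
  · rintro ⟨k, m, hk, hm, hkm, hsub⟩
    refine ⟨(k : Int), ⟨by positivity, by exact_mod_cast hk⟩, ys[m], ?_, ?_⟩
    · have hcast : ((k : Int) + 1) = (((k + 1 : Nat)) : Int) := by push_cast; ring
      rw [hcast, PySem.List.slice_from_natCast]
      exact mem_drop_iff.mpr ⟨m, hm, by omega, rfl⟩
    · rw [PySem.List.pyGetD_natCast, List.getD_eq_getElem _ _ hk]
      exact hsub

-- the bridge: sorted pairs ↔ unordered index pairs of the original list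
theorem bridge (xs : List String) :
    (∃ (k m : Nat) (_ : k < (PySem.List.sorted xs (fun s => PySem.Str.len s)).length)
       (_ : m < (PySem.List.sorted xs (fun s => PySem.Str.len s)).length),
       k < m ∧ PySem.Str.isIn (PySem.List.sorted xs (fun s => PySem.Str.len s))[k]
                 (PySem.List.sorted xs (fun s => PySem.Str.len s))[m] = true)
      ↔ HasPair xs := by
  set ys := PySem.List.sorted xs (fun s => PySem.Str.len s) with hys
  have hperm : ys.Perm xs := PySem.List.sorted_perm xs _ _
  unfold HasPair
  constructor
  · rintro ⟨k, m, hk, hm, hkm, hsub⟩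
    by_cases heq : ys[k] = ys[m]
    · have h2 : 2 ≤ ys.count ys[k] := count_two_of_pair hk hm (by omega) heq
      rw [hperm.count_eq] at h2
      obtain ⟨i, j, hi, hj, hij, hia, hja⟩ := pair_of_count_two h2
      exact ⟨i, j, hi, hj, by omega, by rw [hia, hja]; exact heq ▸ hsub⟩
    · obtain ⟨i, hi, hia⟩ := List.mem_iff_getElem.mp (hperm.mem_iff.mp (List.getElem_mem hk))
      obtain ⟨j, hj, hja⟩ := List.mem_iff_getElem.mp (hperm.mem_iff.mp (List.getElem_mem hm))
      refine ⟨i, j, hi, hj, ?_, by rw [hia, hja]; exact hsub⟩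
      intro h; subst h; exact heq (by rw [← hia, ← hja])
  · rintro ⟨i, j, hi, hj, hij, hsub⟩
    by_cases heq : xs[i] = xs[j]
    · have h2 : 2 ≤ xs.count xs[i] := count_two_of_pair hi hj hij heq
      rw [← hperm.count_eq] at h2
      obtain ⟨k, m, hk, hm, hkm, hka, hma⟩ := pair_of_count_two h2
      refine ⟨k, m, hk, hm, hkm, ?_⟩
      rw [hka, hma]; exact isIn_self _
    · have hlt : xs[i].toList.length < xs[j].toList.length := by
        have hle := isIn_len_le hsub
        rcases Nat.lt_or_ge xs[i].toList.length xs[j].toList.length with h | h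
        · exact h
        · exact absurd (isIn_eq_of_len hsub (by omega)) heq
      obtain ⟨k, hk, hka⟩ := List.mem_iff_getElem.mp (hperm.mem_iff.mpr (List.getElem_mem hi))
      obtain ⟨m, hm, hma⟩ := List.mem_iff_getElem.mp (hperm.mem_iff.mpr (List.getElem_mem hj))
      have hkm : k < m := by
        rcases Nat.lt_or_ge k m with h | h
        · exact h
        · exfalso
          have hmono : PySem.Str.len ys[m] ≤ PySem.Str.len ys[k] :=
            PySem.List.key_sorted_getElem_mono xs (fun s => PySem.Str.len s) h hk
          rw [hka, hma] at hmono
          simp only [PySem.Str.len_eq] at hmono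
          omega
      exact ⟨k, m, hk, hm, hkm, by rw [hka, hma]; exact hsub⟩

-- ===== VERDICT (by name: the statement is the Claim_ definition above) =====
theorem solution_spec : Claim_equal_solution := by
  intro xs _
  unfold Spec_solution
  have h : solution xs = true ↔ solution_alt xs = true := by
    rw [A_iff, B_iff, bridge]
  cases ha : solution xs <;> cases hb : solution_alt xs <;> simp_all
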